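-- pv_equiv track=rewrite | github.com/droidkid/codeBook | simpleMarkDown.py | sanitizeCode
-- ===== SOURCE A (Python) =====
-- def sanitizeCode(line):
--     ret = '';
--     for c in line:
--         if c == '<':
--             ret= ret + '&lt';
--         elif c == '&':
--             ret = ret + '&amp'
--         elif c == '>':
--             ret = ret + '&gt';
--         else:
--             ret = ret + c;
--     return ret;
-- ===== SOURCE B (Python) =====
-- def sanitizeCode(line):
--     # '&' first so ampersands introduced by the later passes are not re-escaped
--     return line.replace('&', '&amp').replace('<', '&lt').replace('>', '&gt')
-- ===== Notes on version B (the rewrite author's own statement) =====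
-- stated objective: faster
-- what changed: Replaces the per-character branching loop with three sequential whole-string str.replace passes ('&' first so later-introduced ampersands are not double-escaped), preserving A's exact outputs including the missing semicolons.
import Mathlib
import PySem

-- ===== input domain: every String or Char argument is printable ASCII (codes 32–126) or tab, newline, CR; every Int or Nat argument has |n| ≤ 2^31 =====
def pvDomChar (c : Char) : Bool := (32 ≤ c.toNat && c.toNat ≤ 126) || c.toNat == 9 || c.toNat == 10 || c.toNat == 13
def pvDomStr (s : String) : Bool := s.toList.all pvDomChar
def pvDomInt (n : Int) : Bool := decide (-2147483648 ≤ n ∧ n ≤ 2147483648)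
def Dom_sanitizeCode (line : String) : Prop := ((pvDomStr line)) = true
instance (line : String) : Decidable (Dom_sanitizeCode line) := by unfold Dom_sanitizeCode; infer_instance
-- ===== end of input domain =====

-- B escapes <, >, & via three sequential whole-string replace passes ('&' first) instead of A's per-character loop; same outputs.


-- ===== PORT A =====
-- ret = ''; for c in line: branch on c, append; return ret
def sanitizeCode (line : String) : String :=
  line.toList.foldl
    (fun ret c =>
      if c = '<' then ret ++ "&lt"
      else if c = '&' then ret ++ "&amp"
      else if c = '>' then ret ++ "&gt"
      else ret.push c)
    ""

-- ===== PORT B =====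
def sanitizeCode_alt (line : String) : String :=
  PySem.Str.replace (PySem.Str.replace (PySem.Str.replace line "&" "&amp") "<" "&lt") ">" "&gt"

-- ===== PRECONDITION & SPEC =====
def Spec_sanitizeCode (line : String) (out : String) : Prop := out = sanitizeCode_alt line
instance (line : String) (out : String) : Decidable (Spec_sanitizeCode line out) := by unfold Spec_sanitizeCode; infer_instance

-- ===== CLAIM (what is proved, stated in full; the proofs are below) =====
def Claim_equal_sanitizeCode : Prop := ∀ (line : String), Dom_sanitizeCode line → Spec_sanitizeCode line (sanitizeCode line)

-- ===== LEMMAS AND PROOFS =====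

-- single-character replace is a single left-to-right pass = flatMap
theorem replace_go_single (c : Char) (new : List Char) :
    ∀ (l acc : List Char) (fuel : Nat), l.length ≤ fuel →
      PySem.Chars.replace.go [c] new fuel l acc
        = acc.reverse ++ l.flatMap (fun x => if x = c then new else [x]) := by
  intro l
  induction l with
  | nil =>
    intro acc fuel _
    cases fuel <;> simp [PySem.Chars.replace.go]
  | cons h t ih =>
    intro acc fuel hf
    cases fuel with
    | zero => simp at hf
    | succ n =>
      have ht : t.length ≤ n := by simp at hf; omega
      rw [PySem.Chars.replace.go]
      by_cases hc : h = c
      · subst hc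
        have hp : List.isPrefixOf [h] (h :: t) = true := by simp [List.isPrefixOf]
        simp only [hp, if_true, List.length_cons, List.length_nil, Nat.zero_add,
          List.drop_succ_cons, List.drop_zero, ih _ n ht]
        simp
      · have hp : List.isPrefixOf [c] (h :: t) = false := by
          simp [List.isPrefixOf]; exact fun e => absurd e.symm hc
        simp only [hp, Bool.false_eq_true, if_false, ih _ n ht]
        simp [hc]

theorem replace_single (c : Char) (new l : List Char) :
    PySem.Chars.replace l [c] new = l.flatMap (fun x => if x = c then new else [x]) := by
  simp [PySem.Chars.replace, replace_go_single c new l [] l.length (le_refl _)]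

def escA (c : Char) : List Char :=
  if c = '<' then "&lt".toList
  else if c = '&' then "&amp".toList
  else if c = '>' then "&gt".toList
  else [c]

theorem foldA_toList (l : List Char) (ret : String) :
    (l.foldl
      (fun ret c =>
        if c = '<' then ret ++ "&lt"
        else if c = '&' then ret ++ "&amp"
        else if c = '>' then ret ++ "&gt"
        else ret.push c) ret).toList = ret.toList ++ l.flatMap escA := by
  induction l generalizing ret with
  | nil => simp
  | cons h t ih =>
    simp only [List.foldl_cons, List.flatMap_cons, escA]
    split_ifs <;>
      simp [String.toList_append, String.toList_push, List.append_assoc, *]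

theorem flatMap_comp (f g : Char → List Char) (l : List Char) :
    (l.flatMap f).flatMap g = l.flatMap (fun c => (f c).flatMap g) := by
  induction l with
  | nil => rfl
  | cons h t ih => simp [ih]

-- the three sequential single-character passes act on each source character like escA
theorem per_char (c : Char) :
    ((if c = '&' then "&amp".toList else [c]).flatMap
        (fun x => (if x = '<' then "&lt".toList else [x]).flatMap
          (fun y => if y = '>' then "&gt".toList else [y]))) = escA c := by
  by_cases h1 : c = '&'
  · subst h1; decide
  by_cases h2 : c = '<'
  · subst h2; decide
  by_cases h3 : c = '>'
  · subst h3; decide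
  simp [escA, h1, h2, h3]

theorem sanitizeCode_spec : Claim_equal_sanitizeCode := by
  intro line _
  unfold Spec_sanitizeCode sanitizeCode sanitizeCode_alt
  apply String.ext  -- equality via toList
  rw [foldA_toList]
  simp only [PySem.Str.toList_replace]
  have e1 : ("&".toList) = ['&'] := rfl
  have e2 : ("<".toList) = ['<'] := rfl
  have e3 : (">".toList) = ['>'] := rfl
  rw [e1, e2, e3, replace_single, replace_single, replace_single,
    flatMap_comp, flatMap_comp]
  simp only [per_char]
  rfl
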